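-- pv_equiv track=rewrite | github.com/basilmt/Sonnet-Generator | main.py | compareSylls
-- ===== SOURCE A (Python) =====
-- def compareSylls(syllable, syllablep):
--     '''
--     compare two given syllables
--     return number of common syllables at the end
--     '''
--
--     level = len(syllablep) if len(syllablep) < len(syllable) else len(syllable)
--     if level > 3 :
--         level = 3
--     while level > 0:
--         if syllable[-level:] == syllablep[-level:] :
--             return level
--         else:
--             level -= 1
--     return 0
-- ===== SOURCE B (Python) =====
-- def compareSylls(syllable, syllablep):
--     cap = min(len(syllable), len(syllablep), 3)
--     count = 0
--     for i in range(1, cap + 1):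
--         if syllable[-i] == syllablep[-i]:
--             count += 1
--         else:
--             break
--     return count
-- ===== Notes on version B (the rewrite author's own statement) =====
-- stated objective: alternative
-- what changed: Instead of comparing shrinking whole-suffix slices top-down (up to 3 slice comparisons of up to 3 chars each), B walks trailing characters once from the end, counting matches and stopping at the first mismatch.
import Mathlib
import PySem

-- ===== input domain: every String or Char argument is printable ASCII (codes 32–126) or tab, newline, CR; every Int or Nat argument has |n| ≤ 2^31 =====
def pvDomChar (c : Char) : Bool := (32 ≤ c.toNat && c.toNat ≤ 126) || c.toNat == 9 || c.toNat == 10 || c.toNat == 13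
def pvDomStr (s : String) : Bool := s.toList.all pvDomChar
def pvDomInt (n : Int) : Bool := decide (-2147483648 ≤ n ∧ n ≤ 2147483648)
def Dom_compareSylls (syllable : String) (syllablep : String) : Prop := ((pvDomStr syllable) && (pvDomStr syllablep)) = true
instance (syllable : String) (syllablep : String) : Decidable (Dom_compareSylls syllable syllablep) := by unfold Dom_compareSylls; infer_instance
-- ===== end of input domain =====

-- B counts matching trailing characters once from the end instead of A's top-down
-- whole-suffix slice comparisons; same result, different decomposition (objective: alternative).

-- ===== PORT A =====
-- the 'while level > 0' loop, structurally recursive on level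
def compareSyllsLoop (a b : List Char) : Nat → Int
  | 0 => 0
  | Nat.succ l =>
      if PySem.List.slice a (some (-((Nat.succ l : Nat) : Int))) none
         = PySem.List.slice b (some (-((Nat.succ l : Nat) : Int))) none then
        ((Nat.succ l : Nat) : Int)
      else
        compareSyllsLoop a b l

def compareSylls (syllable : String) (syllablep : String) : Int :=
  let a := syllable.toList
  let b := syllablep.toList
  let level0 := if b.length < a.length then b.length else a.length
  let level := if level0 > 3 then 3 else level0
  compareSyllsLoop a b level

-- ===== PORT B =====
-- 'for i in range(1, cap+1)' with break on first mismatch; syllable[-i] via pyGet?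
def compareSyllsAltLoop (a b : List Char) (cap : Nat) (i : Nat) (count : Int) : Int :=
  if _h : i ≤ cap then
    if PySem.List.pyGet? a (-(i : Int)) = PySem.List.pyGet? b (-(i : Int)) then
      compareSyllsAltLoop a b cap (i + 1) (count + 1)
    else
      count
  else
    count
termination_by cap + 1 - i

def compareSylls_alt (syllable : String) (syllablep : String) : Int :=
  let a := syllable.toList
  let b := syllablep.toList
  let cap := min (min a.length b.length) 3
  compareSyllsAltLoop a b cap 1 0

-- ===== PRECONDITION & SPEC =====
def Spec_compareSylls (syllable : String) (syllablep : String) (out : Int) : Prop := out = compareSylls_alt syllable syllablep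
instance (syllable : String) (syllablep : String) (out : Int) : Decidable (Spec_compareSylls syllable syllablep out) := by unfold Spec_compareSylls; infer_instance

-- ===== CLAIM (what is proved, stated in full; the proofs are below) =====
def Claim_equal_compareSylls : Prop := ∀ (syllable : String) (syllablep : String), Dom_compareSylls syllable syllablep → Spec_compareSylls syllable syllablep (compareSylls syllable syllablep)

-- ===== LEMMAS AND PROOFS =====

-- length of the common prefix of two lists
def cpl : List Char → List Char → Nat
  | x :: xs, y :: ys => if x = y then cpl xs ys + 1 else 0
  | _, _ => 0

theorem take_eq_iff_le_cpl (k : Nat) (r s : List Char) (hr : k ≤ r.length) (hs : k ≤ s.length) :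
    r.take k = s.take k ↔ k ≤ cpl r s := by
  induction k generalizing r s with
  | zero => simp
  | succ k ih =>
    match r, s with
    | x :: xs, y :: ys =>
      simp only [List.take_succ_cons, List.cons.injEq, cpl]
      by_cases hxy : x = y
      · rw [if_pos hxy]
        rw [ih xs ys (by simpa using hr) (by simpa using hs)]
        simp [hxy]
      · rw [if_neg hxy]
        simp [hxy]

theorem loopA_eq_min_cpl (a b : List Char) (cap : Nat)
    (ha : cap ≤ a.length) (hb : cap ≤ b.length) :
    compareSyllsLoop a b cap = ((min cap (cpl a.reverse b.reverse) : Nat) : Int) := by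
  induction cap with
  | zero => simp [compareSyllsLoop]
  | succ l ih =>
    have hsl : PySem.List.slice a (some (-((l + 1 : Nat) : Int))) none = a.drop (a.length - (l + 1)) :=
      PySem.List.slice_from_neg_natCast a (l + 1) (by omega)
    have hsl' : PySem.List.slice b (some (-((l + 1 : Nat) : Int))) none = b.drop (b.length - (l + 1)) :=
      PySem.List.slice_from_neg_natCast b (l + 1) (by omega)
    have hda : (a.drop (a.length - (l + 1))).reverse = a.reverse.take (l + 1) := by
      rw [List.reverse_drop]
      congr 1
      omega
    have hdb : (b.drop (b.length - (l + 1))).reverse = b.reverse.take (l + 1) := by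
      rw [List.reverse_drop]
      congr 1
      omega
    have hiff : a.drop (a.length - (l + 1)) = b.drop (b.length - (l + 1))
        ↔ a.reverse.take (l + 1) = b.reverse.take (l + 1) := by
      constructor
      · intro h; rw [← hda, ← hdb, h]
      · intro h
        have := congrArg List.reverse (hda.trans (h.trans hdb.symm))
        simpa using this
    have hcplchar : a.reverse.take (l + 1) = b.reverse.take (l + 1) ↔ l + 1 ≤ cpl a.reverse b.reverse :=
      take_eq_iff_le_cpl (l + 1) a.reverse b.reverse (by simpa using ha) (by simpa using hb)
    show compareSyllsLoop a b (Nat.succ l) = _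
    rw [compareSyllsLoop]
    split_ifs with hc
    · have : l + 1 ≤ cpl a.reverse b.reverse := by
        rw [hsl, hsl'] at hc
        exact hcplchar.mp (hiff.mp hc)
      have : min (l + 1) (cpl a.reverse b.reverse) = l + 1 := by omega
      rw [this]
    · have hlt : ¬ (l + 1 ≤ cpl a.reverse b.reverse) := by
        intro h
        exact hc (by rw [hsl, hsl']; exact hiff.mpr (hcplchar.mpr h))
      rw [ih (by omega) (by omega)]
      congr 1
      omega

theorem cpl_drop_head (r s : List Char) (j : Nat) (hr : j < r.length) (hs : j < s.length)
    (h : r[j] = s[j]) : cpl (r.drop j) (s.drop j) = cpl (r.drop (j + 1)) (s.drop (j + 1)) + 1 := by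
  rw [List.drop_eq_getElem_cons hr, List.drop_eq_getElem_cons hs]
  simp [cpl, h]

theorem cpl_drop_head_ne (r s : List Char) (j : Nat) (hr : j < r.length) (hs : j < s.length)
    (h : r[j] ≠ s[j]) : cpl (r.drop j) (s.drop j) = 0 := by
  rw [List.drop_eq_getElem_cons hr, List.drop_eq_getElem_cons hs]
  simp [cpl, h]

theorem loopB_eq (a b : List Char) (cap : Nat) (ha : cap ≤ a.length) (hb : cap ≤ b.length) :
    ∀ j count, j ≤ cap →
      compareSyllsAltLoop a b cap (j + 1) count
        = count + ((min (cap - j) (cpl (a.reverse.drop j) (b.reverse.drop j)) : Nat) : Int) := by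
  intro j
  induction hn : cap - j generalizing j with
  | zero =>
    intro count hj
    have hje : j = cap := by omega
    subst hje
    rw [compareSyllsAltLoop]
    simp
  | succ n ih =>
    intro count hj
    have hjc : j < cap := by omega
    have hja : a.length - (j + 1) < a.length := by omega
    have hjb : b.length - (j + 1) < b.length := by omega
    have hga : PySem.List.pyGet? a (-((j + 1 : Nat) : Int)) = some a[a.length - (j + 1)] := by
      rw [PySem.List.pyGet?_neg_natCast a (j + 1) (by omega) (by omega)]
      exact List.getElem?_eq_getElem hja
    have hgb : PySem.List.pyGet? b (-((j + 1 : Nat) : Int)) = some b[b.length - (j + 1)] := by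
      rw [PySem.List.pyGet?_neg_natCast b (j + 1) (by omega) (by omega)]
      exact List.getElem?_eq_getElem hjb
    have hra : j < a.reverse.length := by simpa using (by omega : j < a.length)
    have hrb : j < b.reverse.length := by simpa using (by omega : j < b.length)
    have hrga : a.reverse[j]'hra = a[a.length - (j + 1)]'hja := by
      rw [List.getElem_reverse]
      congr 1
      omega
    have hrgb : b.reverse[j]'hrb = b[b.length - (j + 1)]'hjb := by
      rw [List.getElem_reverse]
      congr 1
      omega
    rw [compareSyllsAltLoop]
    rw [dif_pos (by omega : j + 1 ≤ cap)]
    rw [hga, hgb]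
    by_cases heq : a[a.length - (j + 1)]'hja = b[b.length - (j + 1)]'hjb
    · rw [if_pos (by rw [heq])]
      rw [ih (j + 1) (by omega) (count + 1) (by omega)]
      have hcp : cpl (a.reverse.drop j) (b.reverse.drop j)
          = cpl (a.reverse.drop (j + 1)) (b.reverse.drop (j + 1)) + 1 :=
        cpl_drop_head a.reverse b.reverse j hra hrb (by rw [hrga, hrgb]; exact heq)
      rw [hcp]
      have : min (n + 1) (cpl (a.reverse.drop (j + 1)) (b.reverse.drop (j + 1)) + 1)
          = min n (cpl (a.reverse.drop (j + 1)) (b.reverse.drop (j + 1))) + 1 := by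
        omega
      rw [this]
      push_cast
      ring
    · rw [if_neg (by simpa using heq)]
      have hcp : cpl (a.reverse.drop j) (b.reverse.drop j) = 0 :=
        cpl_drop_head_ne a.reverse b.reverse j hra hrb (by rw [hrga, hrgb]; exact heq)
      rw [hcp]
      simp

-- ===== VERDICT (by name: the statement is the Claim_ definition above) =====
theorem compareSylls_spec : Claim_equal_compareSylls := by
  intro syllable syllablep _
  unfold Spec_compareSylls compareSylls compareSylls_alt
  set a := syllable.toList with ha
  set b := syllablep.toList with hb
  have hcap : (if (if b.length < a.length then b.length else a.length) > 3 then 3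
      else (if b.length < a.length then b.length else a.length)) = min (min a.length b.length) 3 := by
    split_ifs <;> omega
  simp only [hcap]
  have hA := loopA_eq_min_cpl a b (min (min a.length b.length) 3) (by omega) (by omega)
  have hB := loopB_eq a b (min (min a.length b.length) 3) (by omega) (by omega) 0 0 (by omega)
  rw [hA, hB]
  simp
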